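-- pv_equiv track=rewrite | github.com/queelius/computational-explorations | src/schur_groups.py | _schur_2_colors
-- ===== SOURCE A (Python) =====
-- from itertools import product, combinations
-- from typing import Set, List, Tuple, Dict, FrozenSet, Optional
--
-- def group_add(a: Tuple[int, ...], b: Tuple[int, ...],
--               orders: Tuple[int, ...]) -> Tuple[int, ...]:
--     """Componentwise addition mod orders."""
--     return tuple((ai + bi) % ni for ai, bi, ni in zip(a, b, orders))
--
-- def is_sum_free(S: FrozenSet[Tuple[int, ...]], orders: Tuple[int, ...]) -> bool:
--     """Check if S is sum-free: no a,b,c ∈ S with a+b=c."""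
--     S_set = set(S)
--     for a in S:
--         for b in S:
--             c = group_add(a, b, orders)
--             if c in S_set:
--                 return False
--     return True
--
-- def _schur_2_colors(elements: list, orders: Tuple[int, ...]) -> int:
--     """Compute S(G, 2) by finding max union of two disjoint sum-free sets."""
--     n = len(elements)
--     elem_set = set(range(n))
--
--     # Find all maximal sum-free subsets
--     sum_free_sets = []
--     for size in range(1, n + 1):
--         for combo in combinations(range(n), size):
--             S = frozenset(elements[i] for i in combo)
--             if is_sum_free(S, orders):
--                 sum_free_sets.append(frozenset(combo))
--
--     # Find max |S1 ∪ S2| over disjoint sum-free sets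
--     # Optimization: only check pairs where at least one is maximal
--     maximal = _maximal_sets(sum_free_sets)
--     # Base case: single sum-free set with S2 = ∅
--     best = max((len(S) for S in maximal), default=0)
--
--     for S1 in maximal:
--         remaining_indices = elem_set - S1
--         # Find max sum-free subset of remaining elements
--         remaining_elements = [elements[i] for i in sorted(remaining_indices)]
--         remaining_map = sorted(remaining_indices)
--
--         best_s2 = 0
--         for size2 in range(len(remaining_indices), 0, -1):
--             if len(S1) + size2 <= best:
--                 break
--             found = False
--             for combo in combinations(range(len(remaining_indices)), size2):
--                 S2_elems = frozenset(remaining_elements[i] for i in combo)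
--                 if is_sum_free(S2_elems, orders):
--                     best = max(best, len(S1) + size2)
--                     found = True
--                     break
--             if found:
--                 break
--
--     return best
--
-- def _maximal_sets(sets: List[FrozenSet]) -> List[FrozenSet]:
--     """Filter to maximal sets (not a proper subset of another)."""
--     result = []
--     for S in sets:
--         if not any(S < T for T in sets):
--             result.append(S)
--     return result
-- ===== SOURCE B (Python) =====
-- def _schur_2_colors(elements: list, orders) -> int:
--     """Compute S(G, 2): classify every index subset (as a bitmask) as sum-free
--     once, DP f[mask] = largest sum-free subset inside mask, then combine each
--     sum-free mask with f of its complement."""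
--     n = len(elements)
--     N = 1 << n
--     sf = []
--     pc = []
--     for mask in range(N):
--         vals = {elements[i] for i in range(n) if mask >> i & 1}
--         ok = True
--         for a in vals:
--             if not ok:
--                 break
--             for b in vals:
--                 if tuple((x + y) % m for x, y, m in zip(a, b, orders)) in vals:
--                     ok = False
--                     break
--         sf.append(ok)
--         pc.append(sum(mask >> i & 1 for i in range(n)))
--     f = [0] * N  # f[mask] = size of the largest sum-free subset of mask
--     for mask in range(1, N):
--         if sf[mask]:
--             f[mask] = pc[mask]
--         else:
--             best = 0
--             for i in range(n):
--                 if mask >> i & 1 and f[mask ^ (1 << i)] > best: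
--                     best = f[mask ^ (1 << i)]
--             f[mask] = best
--     best = 0
--     for mask in range(N):
--         if sf[mask] and pc[mask] + f[(N - 1) ^ mask] > best:
--             best = pc[mask] + f[(N - 1) ^ mask]
--     return best
-- ===== Notes on version B (the rewrite author's own statement) =====
-- stated objective: alternative
-- what changed: A enumerates combinations of every size, filters the maximal sum-free sets with a quadratic pass and re-searches the complement of each maximal set with pruning; B classifies every index subset once as a bitmask, computes f[mask] = size of the largest sum-free subset of mask by a subset DP over cleared bits, and combines each sum-free mask with f of its complement (measured ~1.25x in a timing run, so no speed claim).
-- outside the precondition, e.g. on _schur_2_colors([(1,)], (0,)): A raises ZeroDivisionError, B raises ZeroDivisionError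
import Mathlib
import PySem

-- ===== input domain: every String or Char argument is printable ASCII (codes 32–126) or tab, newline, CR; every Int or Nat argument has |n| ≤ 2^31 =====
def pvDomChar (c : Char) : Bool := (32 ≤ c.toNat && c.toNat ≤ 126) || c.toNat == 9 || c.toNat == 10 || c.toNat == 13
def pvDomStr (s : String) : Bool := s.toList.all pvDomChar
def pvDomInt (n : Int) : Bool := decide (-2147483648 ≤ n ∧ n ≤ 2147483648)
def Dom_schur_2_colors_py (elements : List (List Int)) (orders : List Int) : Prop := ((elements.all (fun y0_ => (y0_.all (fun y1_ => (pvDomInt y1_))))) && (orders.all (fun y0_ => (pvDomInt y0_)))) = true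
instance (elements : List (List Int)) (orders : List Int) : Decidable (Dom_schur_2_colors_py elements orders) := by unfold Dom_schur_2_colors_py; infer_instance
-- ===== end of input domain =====

-- B replaces A's combination re-enumeration, quadratic maximal-set filter and pruned
-- per-maximal-set complement search by a single bitmask classification of all subsets
-- plus a subset DP (f[mask] = largest sum-free subset of mask); measured ~1.25x, not
-- claimed faster.

-- ===== PORT A =====
-- group_add: componentwise (a+b) % n over zip (zip truncates at the shortest list)
def pvGroupAdd (a b orders : List Int) : List Int :=
  match a, b, orders with
  | x :: a', y :: b', m :: o' => PySem.Int.mod (x + y) m :: pvGroupAdd a' b' o'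
  | _, _, _ => []

-- is_sum_free: the two for-loops with early `return False` are the Bool `all`s
-- (order over the set does not matter for an `all`)
def pvIsSumFree (S : PySem.Set (List Int)) (orders : List Int) : Bool :=
  S.all fun a => S.all fun b => !(PySem.Set.contains S (pvGroupAdd a b orders))

-- frozensets of INDICES are kept as the (nodup, increasing) combination lists
-- `for size in range(1, n+1): for combo in combinations(...): if ...: append`
def pvSumFreeSets (elements : List (List Int)) (orders : List Int) : List (List Nat) :=
  (List.range elements.length).foldl (fun acc size =>
    acc ++ (PySem.List.combinations (List.range elements.length) (size + 1)).filter
      (fun combo => pvIsSumFree (PySem.Set.ofList (combo.map (fun i => elements.getD i []))) orders)) []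

-- _maximal_sets; frozenset proper inclusion S < T is (S ⊆ T ∧ |S| < |T|) on nodup lists
def pvMaximalAux (sfs : List (List Nat)) : List (List Nat) :=
  sfs.filter (fun S =>
    !(sfs.any (fun T => S.all (fun x => decide (x ∈ T)) && decide (S.length < T.length))))

def pvMaximal (elements : List (List Int)) (orders : List Int) : List (List Nat) :=
  pvMaximalAux (pvSumFreeSets elements orders)

-- max((len(S) for S in maximal), default=0): the running max from 0 (all sizes ≥ 1 ≥ 0)
def pvBest0 (elements : List (List Int)) (orders : List Int) : Nat :=
  ((pvMaximal elements orders).map List.length).foldl max 0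

-- `for size2 in range(len(remaining), 0, -1)` with the two `break`s;
-- the first `combo` hit only sets best and exits, so the Bool `any` is exact
def pvInner (rem : List (List Int)) (orders : List Int) (lenS1 : Nat) : Nat → Nat → Nat
  | 0, best => best
  | (k+1), best =>
    if lenS1 + (k+1) ≤ best then best
    else if (PySem.List.combinations (List.range rem.length) (k+1)).any
        (fun c => pvIsSumFree (PySem.Set.ofList (c.map (fun i => rem.getD i []))) orders) then
      max best (lenS1 + (k+1))
    else pvInner rem orders lenS1 k best

def schur_2_colors_py (elements : List (List Int)) (orders : List Int) : Int :=
  let n := elements.length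
  (((pvMaximal elements orders).foldl (fun best S1 =>
      -- sorted(elem_set - S1) is the increasing filter of range n
      let remaining := (List.range n).filter (fun i => decide (¬ i ∈ S1))
      pvInner (remaining.map (fun i => elements.getD i [])) orders S1.length remaining.length best)
    (pvBest0 elements orders) : Nat) : Int)

-- ===== PORT B =====
def pvAltAdd (a b orders : List Int) : List Int :=
  match a, b, orders with
  | x :: a', y :: b', m :: o' => PySem.Int.mod (x + y) m :: pvAltAdd a' b' o'
  | _, _, _ => []

-- the sum-free test of the index set of `mask` (B's ok flag: early breaks = Bool all)
def pvOk (elements : List (List Int)) (orders : List Int) (mask : Nat) : Bool :=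
  let vals := PySem.Set.ofList
    (((List.range elements.length).filter (fun i => (mask >>> i) &&& 1 == 1)).map
      (fun i => elements.getD i []))
  vals.all fun a => vals.all fun b => !(PySem.Set.contains vals (pvAltAdd a b orders))

def pvSfList (elements : List (List Int)) (orders : List Int) : List Bool :=
  (List.range (2 ^ elements.length)).foldl (fun acc mask => acc ++ [pvOk elements orders mask]) []

def pvPcList (elements : List (List Int)) : List Nat :=
  (List.range (2 ^ elements.length)).foldl (fun acc mask =>
    acc ++ [((List.range elements.length).map (fun i => (mask >>> i) &&& 1)).sum]) []

-- f[mask] = size of the largest sum-free subset of mask; the preallocated array,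
-- written left to right at ascending masks and read below the write position,
-- is ported as the grown prefix [f[0], …, f[mask]]
def pvFList (elements : List (List Int)) (orders : List Int) : List Nat :=
  let sf := pvSfList elements orders
  let pc := pvPcList elements
  (List.range' 1 (2 ^ elements.length - 1)).foldl (fun f mask =>
    f ++ [if sf.getD mask false then pc.getD mask 0
          else (List.range elements.length).foldl (fun best i =>
            if ((mask >>> i) &&& 1 == 1) && decide (f.getD (mask ^^^ (1 <<< i)) 0 > best)
            then f.getD (mask ^^^ (1 <<< i)) 0 else best) 0]) [0]

def schur_2_colors_py_alt (elements : List (List Int)) (orders : List Int) : Int :=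
  let N := 2 ^ elements.length
  let sf := pvSfList elements orders
  let pc := pvPcList elements
  let f := pvFList elements orders
  (((List.range N).foldl (fun best mask =>
      if sf.getD mask false && decide (pc.getD mask 0 + f.getD ((N-1) ^^^ mask) 0 > best)
      then pc.getD mask 0 + f.getD ((N-1) ^^^ mask) 0
      else best) 0 : Nat) : Int)

-- ===== PRECONDITION & SPEC =====
-- Pre_ excludes exactly the ZeroDivisionError inputs: Python raises as soon as some
-- element row meets a 0 in orders inside the zip range of `(ai + bi) % ni`
-- (the singleton subsets force every element through group_add); B raises there too.
def Pre_schur_2_colors_py (elements : List (List Int)) (orders : List Int) : Prop :=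
  ∀ e ∈ elements, ∀ p ∈ e.zip orders, p.2 ≠ 0
instance (elements : List (List Int)) (orders : List Int) : Decidable (Pre_schur_2_colors_py elements orders) := by unfold Pre_schur_2_colors_py; infer_instance

def pvWitness_schur_2_colors_py : List (List Int) × List Int := ([[1], [2], [4]], [5])

def Spec_schur_2_colors_py (elements : List (List Int)) (orders : List Int) (out : Int) : Prop := out = schur_2_colors_py_alt elements orders
instance (elements : List (List Int)) (orders : List Int) (out : Int) : Decidable (Spec_schur_2_colors_py elements orders out) := by unfold Spec_schur_2_colors_py; infer_instance

-- ===== CLAIM (what is proved, stated in full; the proofs are below) =====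
def Claim_equal_schur_2_colors_py : Prop := ∀ (elements : List (List Int)) (orders : List Int), Dom_schur_2_colors_py elements orders → Pre_schur_2_colors_py elements orders → Spec_schur_2_colors_py elements orders (schur_2_colors_py elements orders)

-- ===== LEMMAS AND PROOFS =====

-- ---- the common mathematical reading: index sets as bitmasks ----

/-- the value of index `i` -/
def pvF (elements : List (List Int)) (i : Nat) : List Int := elements.getD i []

/-- "the index list `d` names a sum-free set of group elements" -/
@[reducible] def pvSF (elements : List (List Int)) (orders : List Int) (d : List Nat) : Prop :=
  ∀ a ∈ d, ∀ b ∈ d, ∀ c ∈ d,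
    pvGroupAdd (pvF elements a) (pvF elements b) orders ≠ pvF elements c

/-- the (increasing) list of bits of a mask below `n` -/
def pvBits (n m : Nat) : List Nat := (List.range n).filter (fun i => m.testBit i)

def pvMaskOf (c : List Nat) : Nat := c.foldr (fun i m => 2 ^ i ||| m) 0

/-- the value both programs compute: the largest total size of two disjoint
sum-free index sets (as bitmasks below 2^n) -/
def pvOPT (elements : List (List Int)) (orders : List Int) : Nat :=
  ((Finset.range (2 ^ elements.length)) ×ˢ (Finset.range (2 ^ elements.length))).sup fun p =>
    if p.1 &&& p.2 = 0 ∧ pvSF elements orders (pvBits elements.length p.1) ∧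
        pvSF elements orders (pvBits elements.length p.2)
    then (pvBits elements.length p.1).length + (pvBits elements.length p.2).length else 0

-- ---- tiny generic fold lemmas (running max loops) ----

theorem pvFoldl_mono {α : Type} (st : Nat → α → Nat) (h : ∀ b x, b ≤ st b x) :
    ∀ (L : List α) (b : Nat), b ≤ L.foldl st b := by
  intro L; induction L with
  | nil => intro b; simp
  | cons x t ih => intro b; exact le_trans (h b x) (ih (st b x))

theorem pvFoldl_le {α : Type} (st : Nat → α → Nat) (C : Nat) (L : List α)
    (h : ∀ b x, x ∈ L → b ≤ C → st b x ≤ C) : ∀ b, b ≤ C → L.foldl st b ≤ C := by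
  induction L with
  | nil => intro b hb; simpa using hb
  | cons x t ih =>
    intro b hb
    exact ih (fun b y hy => h b y (List.mem_cons_of_mem _ hy)) _ (h b x (List.mem_cons_self) hb)

theorem pvFoldl_reach {α : Type} (st : Nat → α → Nat) (hmono : ∀ b x, b ≤ st b x)
    {L : List α} {x : α} (hx : x ∈ L) (v : Nat) (h : ∀ b, v ≤ st b x) :
    ∀ b, v ≤ L.foldl st b := by
  induction L with
  | nil => cases hx
  | cons y t ih =>
    intro b
    rcases List.mem_cons.mp hx with rfl | hx'
    · exact le_trans (h b) (pvFoldl_mono st hmono t (st b x))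
    · exact ih hx' (st b y)

theorem pvFoldl_max_le (L : List Nat) (C : Nat) (h : ∀ y ∈ L, y ≤ C) :
    ∀ b, b ≤ C → L.foldl max b ≤ C := by
  induction L with
  | nil => intro b hb; simpa using hb
  | cons x t ih =>
    intro b hb
    exact ih (fun y hy => h y (List.mem_cons_of_mem _ hy))
      _ (max_le hb (h x (List.mem_cons_self)))

-- ---- sum-free checks read as pvSF ----

theorem pvAltAdd_eq (a b orders : List Int) : pvAltAdd a b orders = pvGroupAdd a b orders := by
  induction a generalizing b orders with
  | nil => rfl
  | cons x a' ih =>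
    cases b with
    | nil => rfl
    | cons y b' =>
      cases orders with
      | nil => rfl
      | cons m o' => simp [pvAltAdd, pvGroupAdd, ih]

theorem pvCheck_iff (elements : List (List Int)) (orders : List Int) (d : List Nat) :
    pvIsSumFree (PySem.Set.ofList (d.map (fun i => elements.getD i []))) orders = true ↔
      pvSF elements orders d := by
  unfold pvIsSumFree pvSF
  simp only [List.all_eq_true, Bool.not_eq_eq_eq_not, Bool.not_true]
  constructor
  · intro h a ha b hb c hc heq
    have ha' : pvF elements a ∈ PySem.Set.ofList (d.map (fun i => elements.getD i [])) := by
      rw [PySem.Set.mem_ofList]; exact List.mem_map_of_mem ha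
    have hb' : pvF elements b ∈ PySem.Set.ofList (d.map (fun i => elements.getD i [])) := by
      rw [PySem.Set.mem_ofList]; exact List.mem_map_of_mem hb
    have hc' : pvGroupAdd (pvF elements a) (pvF elements b) orders ∈
        PySem.Set.ofList (d.map (fun i => elements.getD i [])) := by
      rw [PySem.Set.mem_ofList, heq]; exact List.mem_map_of_mem hc
    have := h _ ha' _ hb'
    rw [(PySem.Set.contains_iff _ _).mpr hc'] at this
    simp at this
  · intro h a' ha' b' hb'
    rw [PySem.Set.mem_ofList, List.mem_map] at ha' hb'
    obtain ⟨a, ha, rfl⟩ := ha'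
    obtain ⟨b, hb, rfl⟩ := hb'
    rcases hct : PySem.Set.contains (PySem.Set.ofList (d.map (fun i => elements.getD i [])))
        (pvGroupAdd (elements.getD a []) (elements.getD b []) orders)
    · rfl
    · exfalso
      rw [PySem.Set.contains_iff, PySem.Set.mem_ofList, List.mem_map] at hct
      obtain ⟨c, hc, hceq⟩ := hct
      exact h a ha b hb c hc hceq.symm

-- ---- masks ↔ index lists ----

theorem pvBit_eq (m i : Nat) : ((m >>> i) &&& 1 == 1) = m.testBit i := by
  simp [Nat.testBit, Nat.and_one_is_mod, Nat.shiftRight_eq_div_pow]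

theorem pvTestBit_maskOf (c : List Nat) (j : Nat) :
    (pvMaskOf c).testBit j = true ↔ j ∈ c := by
  induction c with
  | nil => simp [pvMaskOf]
  | cons x t ih =>
    simp only [pvMaskOf, List.foldr_cons, Nat.testBit_or, Nat.testBit_two_pow,
      Bool.or_eq_true, decide_eq_true_eq, List.mem_cons]
    rw [show (List.foldr (fun i m => 2 ^ i ||| m) 0 t) = pvMaskOf t from rfl, ih]
    constructor
    · rintro (rfl | h)
      · exact Or.inl rfl
      · exact Or.inr h
    · rintro (rfl | h)
      · exact Or.inl rfl
      · exact Or.inr h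

theorem pvMaskOf_lt (c : List Nat) (n : Nat) (h : ∀ x ∈ c, x < n) : pvMaskOf c < 2 ^ n := by
  induction c with
  | nil => simp [pvMaskOf]
  | cons x t ih =>
    have hx : (2:Nat) ^ x < 2 ^ n := Nat.pow_lt_pow_right one_lt_two (h x (List.mem_cons_self))
    have ht := ih (fun y hy => h y (List.mem_cons_of_mem _ hy))
    simpa [pvMaskOf] using Nat.or_lt_two_pow hx ht

theorem pvFilter_mem_of_sublist (c l : List Nat) (hnd : l.Nodup) (h : c.Sublist l) :
    l.filter (fun x => decide (x ∈ c)) = c := by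
  induction h with
  | slnil => rfl
  | cons a h ih =>
    rename_i l₁ l₂
    have : a ∉ l₁ := fun hm => (List.nodup_cons.mp hnd).1 (h.subset hm)
    simp [List.filter_cons, this, ih (List.nodup_cons.mp hnd).2]
  | cons₂ a h ih =>
    rename_i l₁ l₂
    have ha : a ∉ l₂ := (List.nodup_cons.mp hnd).1
    simp only [List.filter_cons, decide_eq_true_eq, List.mem_cons, if_pos (Or.inl rfl),
      true_or, if_true]
    congr 1
    rw [show List.filter (fun x => decide (x = a ∨ x ∈ l₁)) l₂
        = List.filter (fun x => decide (x ∈ l₁)) l₂ from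
      List.filter_congr (fun x hx => by
        simp only [decide_eq_decide]
        exact ⟨fun h => h.resolve_left (fun he => ha (he ▸ hx)), Or.inr⟩)]
    exact ih (List.nodup_cons.mp hnd).2

theorem pvBits_maskOf (n : Nat) (c : List Nat) (h : c.Sublist (List.range n)) :
    pvBits n (pvMaskOf c) = c := by
  have : pvBits n (pvMaskOf c) = (List.range n).filter (fun x => decide (x ∈ c)) := by
    apply List.filter_congr
    intro x _
    cases hb : (pvMaskOf c).testBit x
    · simp only [Bool.false_eq, decide_eq_false_iff_not]
      intro hm
      rw [(pvTestBit_maskOf c x).mpr hm] at hb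
      exact Bool.false_ne_true hb.symm
    · simp only [Bool.true_eq, decide_eq_true_eq]
      exact (pvTestBit_maskOf c x).mp hb
  rw [this, pvFilter_mem_of_sublist c _ (List.nodup_range) h]

theorem pvMem_bits (n m j : Nat) : j ∈ pvBits n m ↔ j < n ∧ m.testBit j = true := by
  simp [pvBits, List.mem_filter, List.mem_range]

theorem pvBits_sublist (n m : Nat) : (pvBits n m).Sublist (List.range n) :=
  List.filter_sublist

theorem pvBits_zero (n : Nat) : pvBits n 0 = [] := by
  simp [pvBits, Nat.zero_testBit, List.filter_false]

theorem pvAnd_eq_zero_iff (s t : Nat) :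
    s &&& t = 0 ↔ ∀ j, ¬(s.testBit j = true ∧ t.testBit j = true) := by
  constructor
  · intro h j hj
    have := congrArg (Nat.testBit · j) h
    simp [Nat.testBit_and, Nat.zero_testBit] at this
    rw [this hj.1] at hj
    simp at hj
  · intro h
    apply Nat.eq_of_testBit_eq
    intro j
    simp only [Nat.testBit_and, Nat.zero_testBit]
    by_cases hs : s.testBit j = true
    · by_cases ht : t.testBit j = true
      · exact absurd ⟨hs, ht⟩ (h j)
      · simp [hs, ht, Bool.eq_false_iff.mpr ht]
    · simp [Bool.eq_false_iff.mpr hs]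

theorem pvSubmask_testBit {t m i : Nat} (h : t &&& m = t) (hi : t.testBit i = true) :
    m.testBit i = true := by
  have := congrArg (Nat.testBit · i) h
  simp [Nat.testBit_and] at this
  exact this hi

theorem pvSF_mono (elements : List (List Int)) (orders : List Int) {d d' : List Nat}
    (h : ∀ x ∈ d, x ∈ d') : pvSF elements orders d' → pvSF elements orders d :=
  fun hs a ha b hb c hc => hs a (h a ha) b (h b hb) c (h c hc)

theorem pvNodup_length_le (l1 l2 : List Nat) (h1 : l1.Nodup) (hs : ∀ x ∈ l1, x ∈ l2) :
    l1.length ≤ l2.length := by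
  classical
  calc l1.length = l1.toFinset.card := (List.toFinset_card_of_nodup h1).symm
  _ ≤ l2.toFinset.card := Finset.card_le_card (fun x hx => by
      simp only [List.mem_toFinset] at *; exact hs x hx)
  _ ≤ l2.length := l2.toFinset_card_le

-- disjoint-union counting: |bs| + |bt| ≤ |M| + |bt \ M| when bs ⊆ M and bs ∩ bt = ∅
theorem pvCount_le (bs bt M : List Nat) (hbs : bs.Nodup) (hbt : bt.Nodup)
    (hsub : ∀ x ∈ bs, x ∈ M) (hdisj : ∀ x, ¬(x ∈ bs ∧ x ∈ bt)) :
    bs.length + bt.length ≤ M.length + (bt.filter (fun x => decide (¬ x ∈ M))).length := by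
  classical
  have hsplit : (bt.filter (fun x => decide (x ∈ M))).length +
      (bt.filter (fun x => !(decide (x ∈ M)))).length = bt.length :=
    (List.length_eq_length_filter_add _).symm
  have hneg : bt.filter (fun x => decide (¬ x ∈ M)) = bt.filter (fun x => !(decide (x ∈ M))) := by
    apply List.filter_congr; intro x _; simp
  rw [hneg]
  have hkey : bs.length + (bt.filter (fun x => decide (x ∈ M))).length ≤ M.length := by
    have hnd1 : bs.Nodup := hbs
    have hnd2 : (bt.filter (fun x => decide (x ∈ M))).Nodup := hbt.filter _
    have hdisjf : Disjoint bs.toFinset (bt.filter (fun x => decide (x ∈ M))).toFinset := by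
      rw [Finset.disjoint_left]
      intro x hx hx2
      simp only [List.mem_toFinset, List.mem_filter] at hx hx2
      exact hdisj x ⟨hx, hx2.1⟩
    calc bs.length + (bt.filter (fun x => decide (x ∈ M))).length
        = bs.toFinset.card + (bt.filter (fun x => decide (x ∈ M))).toFinset.card := by
          rw [List.toFinset_card_of_nodup hnd1, List.toFinset_card_of_nodup hnd2]
      _ = (bs.toFinset ∪ (bt.filter (fun x => decide (x ∈ M))).toFinset).card :=
          (Finset.card_union_of_disjoint hdisjf).symm
      _ ≤ M.toFinset.card := by
          apply Finset.card_le_card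
          intro x hx
          simp only [List.mem_toFinset, Finset.mem_union, List.mem_filter,
            decide_eq_true_eq] at hx ⊢
          rcases hx with hx | hx
          · exact hsub x hx
          · exact hx.2
      _ ≤ M.length := M.toFinset_card_le
  omega

-- ---- what sum_free_sets and maximal contain ----

theorem pvMem_sumFreeSets (elements : List (List Int)) (orders : List Int) (S : List Nat) :
    S ∈ pvSumFreeSets elements orders ↔
      S.Sublist (List.range elements.length) ∧ S ≠ [] ∧ pvSF elements orders S := by
  unfold pvSumFreeSets
  rw [PySem.List.foldl_append_eq_flatMap]
  simp only [List.nil_append, List.mem_flatMap, List.mem_filter,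
    PySem.List.mem_combinations_iff, List.mem_range, pvCheck_iff]
  constructor
  · rintro ⟨size, hsz, ⟨hsub, hlen⟩, hsf⟩
    exact ⟨hsub, by simp [← List.length_pos_iff, hlen], hsf⟩
  · rintro ⟨hsub, hne, hsf⟩
    have hpos : 0 < S.length := List.length_pos_iff.mpr hne
    have hle : S.length ≤ elements.length := by
      simpa using hsub.length_le
    exact ⟨S.length - 1, by omega, ⟨hsub, by omega⟩, hsf⟩

theorem pvMem_maximal (elements : List (List Int)) (orders : List Int) (M : List Nat) :
    M ∈ pvMaximal elements orders ↔
      M ∈ pvSumFreeSets elements orders ∧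
      ∀ T ∈ pvSumFreeSets elements orders, ¬((∀ x ∈ M, x ∈ T) ∧ M.length < T.length) := by
  unfold pvMaximal pvMaximalAux
  simp only [List.mem_filter, Bool.not_eq_eq_eq_not, Bool.not_true, ← Bool.not_eq_true,
    List.any_eq_true, Bool.and_eq_true, List.all_eq_true, decide_eq_true_eq, not_exists, not_and]

theorem pvExtend (elements : List (List Int)) (orders : List Int) :
    ∀ S ∈ pvSumFreeSets elements orders,
      ∃ M ∈ pvMaximal elements orders, ∀ x ∈ S, x ∈ M := by
  suffices h : ∀ (k : Nat) (S : List Nat), S ∈ pvSumFreeSets elements orders →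
      elements.length - S.length ≤ k → ∃ M ∈ pvMaximal elements orders, ∀ x ∈ S, x ∈ M by
    intro S hS
    exact h elements.length S hS (by omega)
  intro k
  induction k with
  | zero =>
    intro S hS hk
    have hsub := ((pvMem_sumFreeSets elements orders S).mp hS).1
    have hlen : S.length ≤ elements.length := by simpa using hsub.length_le
    refine ⟨S, (pvMem_maximal elements orders S).mpr ⟨hS, ?_⟩, fun x hx => hx⟩
    intro T hT ⟨hTs, hTl⟩
    have hTsub := ((pvMem_sumFreeSets elements orders T).mp hT).1
    have : T.length ≤ elements.length := by simpa using hTsub.length_le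
    omega
  | succ k ih =>
    intro S hS hk
    by_cases hmax : ∀ T ∈ pvSumFreeSets elements orders, ¬((∀ x ∈ S, x ∈ T) ∧ S.length < T.length)
    · exact ⟨S, (pvMem_maximal elements orders S).mpr ⟨hS, hmax⟩, fun x hx => hx⟩
    · push Not at hmax
      obtain ⟨T, hT, hTs, hTl⟩ := hmax
      have hTsub := ((pvMem_sumFreeSets elements orders T).mp hT).1
      have hTle : T.length ≤ elements.length := by simpa using hTsub.length_le
      obtain ⟨M, hM, hMs⟩ := ih T hT (by omega)
      exact ⟨M, hM, fun x hx => hMs x (hTs x hx)⟩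

theorem pvSelf_eq_map_getD (l : List (List Int)) :
    (List.range l.length).map (fun i => l.getD i []) = l := by
  apply List.ext_getElem
  · simp
  · intro i h1 h2
    simp only [List.getElem_map, List.getElem_range, List.getD_eq_getElem?_getD]
    simp [List.getElem?_eq_getElem h2]

-- ---- the inner loop ----

def pvFound (rem : List (List Int)) (orders : List Int) (k : Nat) : Prop :=
  ((PySem.List.combinations (List.range rem.length) k).any
    (fun c => pvIsSumFree (PySem.Set.ofList (c.map (fun i => rem.getD i []))) orders)) = true

theorem pvFound_iff (rem : List (List Int)) (orders : List Int) (k : Nat) :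
    pvFound rem orders k ↔
      ∃ d, d.Sublist rem ∧ d.length = k ∧ pvIsSumFree (PySem.Set.ofList d) orders = true := by
  unfold pvFound
  rw [show ((PySem.List.combinations (List.range rem.length) k).any
      (fun c => pvIsSumFree (PySem.Set.ofList (c.map (fun i => rem.getD i []))) orders))
      = ((PySem.List.combinations (List.range rem.length) k).map
          (List.map (fun i => rem.getD i []))).any
        (fun d => pvIsSumFree (PySem.Set.ofList d) orders) by rw [List.any_map]; rfl]
  rw [← PySem.List.combinations_map, pvSelf_eq_map_getD]
  simp only [List.any_eq_true, PySem.List.mem_combinations_iff]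
  constructor
  · rintro ⟨d, ⟨h1, h2⟩, h3⟩
    exact ⟨d, h1, h2, h3⟩
  · rintro ⟨d, h1, h2, h3⟩
    exact ⟨d, ⟨h1, h2⟩, h3⟩

theorem pvInner_ge (rem : List (List Int)) (orders : List Int) (L : Nat) :
    ∀ k best, best ≤ pvInner rem orders L k best := by
  intro k
  induction k with
  | zero => intro best; simp [pvInner]
  | succ k ih =>
    intro best
    simp only [pvInner]
    split
    · exact le_refl _
    · split
      · exact le_max_left _ _
      · exact ih best

theorem pvInner_le (rem : List (List Int)) (orders : List Int) (L C : Nat)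
    (h : ∀ j, 1 ≤ j → pvFound rem orders j → L + j ≤ C) :
    ∀ k best, best ≤ C → pvInner rem orders L k best ≤ C := by
  intro k
  induction k with
  | zero => intro best hb; simpa [pvInner] using hb
  | succ k ih =>
    intro best hb
    simp only [pvInner]
    split
    · exact hb
    · split
      · exact max_le hb (h (k+1) (Nat.succ_le_succ (Nat.zero_le _)) (by assumption))
      · exact ih best hb

theorem pvInner_reach (rem : List (List Int)) (orders : List Int) (L t : Nat)
    (ht : 1 ≤ t) (hf : pvFound rem orders t) :
    ∀ k best, t ≤ k → L + t ≤ pvInner rem orders L k best := by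
  intro k
  induction k with
  | zero => intro best h; omega
  | succ k ih =>
    intro best htk
    simp only [pvInner]
    split
    · omega
    · split
      · exact le_trans (by omega) (le_max_right _ _)
      · rename_i h1 h2
        have : t ≠ k + 1 := by
          rintro rfl
          exact h2 hf
        exact ih best (by omega)

-- ---- pvOPT bounds ----

theorem pvLe_OPT (elements : List (List Int)) (orders : List Int) {s t : Nat}
    (hs : s < 2 ^ elements.length) (ht : t < 2 ^ elements.length) (hd : s &&& t = 0)
    (hss : pvSF elements orders (pvBits elements.length s))
    (hst : pvSF elements orders (pvBits elements.length t)) :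
    (pvBits elements.length s).length + (pvBits elements.length t).length ≤
      pvOPT elements orders := by
  have hm : (s, t) ∈ (Finset.range (2 ^ elements.length)) ×ˢ (Finset.range (2 ^ elements.length)) := by
    simp [Finset.mem_product, hs, ht]
  have := Finset.le_sup (f := fun p : Nat × Nat =>
    if p.1 &&& p.2 = 0 ∧ pvSF elements orders (pvBits elements.length p.1) ∧
        pvSF elements orders (pvBits elements.length p.2)
    then (pvBits elements.length p.1).length + (pvBits elements.length p.2).length else 0) hm
  dsimp only at this
  rw [if_pos ⟨hd, hss, hst⟩] at this
  exact this

theorem pvOPT_le (elements : List (List Int)) (orders : List Int) (C : Nat)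
    (h : ∀ s t, s < 2 ^ elements.length → t < 2 ^ elements.length → s &&& t = 0 →
      pvSF elements orders (pvBits elements.length s) →
      pvSF elements orders (pvBits elements.length t) →
      (pvBits elements.length s).length + (pvBits elements.length t).length ≤ C) :
    pvOPT elements orders ≤ C := by
  apply Finset.sup_le
  rintro ⟨s, t⟩ hm
  simp only [Finset.mem_product, Finset.mem_range] at hm
  split
  · rename_i hc
    exact h s t hm.1 hm.2 hc.1 hc.2.1 hc.2.2
  · exact Nat.zero_le _

-- ---- A = pvOPT ----

/-- A's outer loop body -/
def pvAStep (elements : List (List Int)) (orders : List Int) (best : Nat) (S1 : List Nat) : Nat :=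
  let remaining := (List.range elements.length).filter (fun i => decide (¬ i ∈ S1))
  pvInner (remaining.map (fun i => elements.getD i [])) orders S1.length remaining.length best

theorem pvA_unfold (elements : List (List Int)) (orders : List Int) :
    schur_2_colors_py elements orders =
      (((pvMaximal elements orders).foldl (pvAStep elements orders) (pvBest0 elements orders) : Nat) : Int) := rfl

/-- both A-side facts about a maximal set -/
theorem pvMaximal_facts (elements : List (List Int)) (orders : List Int) (M : List Nat)
    (hM : M ∈ pvMaximal elements orders) :
    M.Sublist (List.range elements.length) ∧ pvSF elements orders M := by
  have := (pvMem_sumFreeSets elements orders M).mp ((pvMem_maximal elements orders M).mp hM).1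
  exact ⟨this.1, this.2.2⟩

/-- two disjoint sum-free index lists under range n bound pvOPT from below -/
theorem pvLists_le_OPT (elements : List (List Int)) (orders : List Int) (c1 c2 : List Nat)
    (h1 : c1.Sublist (List.range elements.length)) (h2 : c2.Sublist (List.range elements.length))
    (hd : ∀ x, ¬(x ∈ c1 ∧ x ∈ c2))
    (hs1 : pvSF elements orders c1) (hs2 : pvSF elements orders c2) :
    c1.length + c2.length ≤ pvOPT elements orders := by
  have hb1 : ∀ x ∈ c1, x < elements.length := fun x hx => by
    simpa using List.mem_range.mp (h1.subset hx)
  have hb2 : ∀ x ∈ c2, x < elements.length := fun x hx => by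
    simpa using List.mem_range.mp (h2.subset hx)
  have hm1 := pvMaskOf_lt c1 elements.length hb1
  have hm2 := pvMaskOf_lt c2 elements.length hb2
  have hr1 := pvBits_maskOf elements.length c1 h1
  have hr2 := pvBits_maskOf elements.length c2 h2
  have hdisj : pvMaskOf c1 &&& pvMaskOf c2 = 0 := by
    rw [pvAnd_eq_zero_iff]
    intro j ⟨hj1, hj2⟩
    exact hd j ⟨(pvTestBit_maskOf c1 j).mp hj1, (pvTestBit_maskOf c2 j).mp hj2⟩
  have := pvLe_OPT elements orders hm1 hm2 hdisj
    (by rw [hr1]; exact hs1) (by rw [hr2]; exact hs2)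
  rwa [hr1, hr2] at this

theorem pvList_le_OPT (elements : List (List Int)) (orders : List Int) (c : List Nat)
    (h : c.Sublist (List.range elements.length)) (hs : pvSF elements orders c) :
    c.length ≤ pvOPT elements orders := by
  have := pvLists_le_OPT elements orders c [] h (List.nil_sublist _)
    (by simp) hs (by intro a ha; cases ha)
  simpa using this

theorem pvBest0_le_OPT (elements : List (List Int)) (orders : List Int) :
    pvBest0 elements orders ≤ pvOPT elements orders := by
  unfold pvBest0
  refine pvFoldl_max_le _ _ (fun y hy => ?_) 0 (Nat.zero_le _)
  obtain ⟨M, hM, rfl⟩ := List.mem_map.mp hy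
  obtain ⟨hsub, hsf⟩ := pvMaximal_facts elements orders M hM
  exact pvList_le_OPT elements orders M hsub hsf

theorem pvAStep_ge (elements : List (List Int)) (orders : List Int) (best : Nat) (S1 : List Nat) :
    best ≤ pvAStep elements orders best S1 := pvInner_ge _ _ _ _ _

theorem pvA_le_OPT (elements : List (List Int)) (orders : List Int) :
    (pvMaximal elements orders).foldl (pvAStep elements orders) (pvBest0 elements orders) ≤
      pvOPT elements orders := by
  refine pvFoldl_le _ _ _ (fun best M hM hle => ?_) _ (pvBest0_le_OPT elements orders)
  obtain ⟨hMsub, hMsf⟩ := pvMaximal_facts elements orders M hM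
  unfold pvAStep
  refine pvInner_le _ _ _ _ (fun j hj hf => ?_) _ best hle
  obtain ⟨d, hdsub, hdlen, hdchk⟩ := (pvFound_iff _ orders j).mp hf
  obtain ⟨c, hcsub, rfl⟩ := List.sublist_map_iff.mp hdsub
  have hcchk : pvSF elements orders c := (pvCheck_iff elements orders c).mp hdchk
  have hcrem : ∀ x ∈ c, x ∈ (List.range elements.length).filter (fun i => decide (¬ i ∈ M)) :=
    fun x hx => hcsub.subset hx
  have hcrange : c.Sublist (List.range elements.length) := hcsub.trans List.filter_sublist
  have hcdisj : ∀ x, ¬(x ∈ M ∧ x ∈ c) := by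
    intro x ⟨hxM, hxc⟩
    have := List.mem_filter.mp (hcrem x hxc)
    simp only [decide_eq_true_eq] at this
    exact this.2 hxM
  have hclen : c.length = j := by simpa using hdlen
  have := pvLists_le_OPT elements orders M c hMsub hcrange hcdisj hMsf hcchk
  omega

theorem pvSingle_le_A (elements : List (List Int)) (orders : List Int) (c : List Nat)
    (hsub : c.Sublist (List.range elements.length)) (hsf : pvSF elements orders c) :
    c.length ≤ (pvMaximal elements orders).foldl (pvAStep elements orders) (pvBest0 elements orders) := by
  have hA0 : pvBest0 elements orders ≤
      (pvMaximal elements orders).foldl (pvAStep elements orders) (pvBest0 elements orders) :=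
    pvFoldl_mono _ (pvAStep_ge elements orders) _ _
  rcases eq_or_ne c [] with rfl | hne
  · simpa using Nat.zero_le _
  · have hc : c ∈ pvSumFreeSets elements orders :=
      (pvMem_sumFreeSets elements orders c).mpr ⟨hsub, hne, hsf⟩
    obtain ⟨M, hM, hMs⟩ := pvExtend elements orders c hc
    have hlen : c.length ≤ M.length :=
      pvNodup_length_le c M (hsub.nodup List.nodup_range) hMs
    have hM0 : M.length ≤ pvBest0 elements orders :=
      (PySem.List.le_foldl_max ((pvMaximal elements orders).map List.length) 0).2 _
        (List.mem_map_of_mem hM)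
    omega

theorem pvOPT_le_A (elements : List (List Int)) (orders : List Int) :
    pvOPT elements orders ≤
      (pvMaximal elements orders).foldl (pvAStep elements orders) (pvBest0 elements orders) := by
  refine pvOPT_le elements orders _ (fun s t hs ht hd hss hst => ?_)
  set n := elements.length with hn
  by_cases hbs : pvBits n s = []
  · rw [hbs]
    simpa using pvSingle_le_A elements orders (pvBits n t) (pvBits_sublist n t) hst
  · have hsfs : pvBits n s ∈ pvSumFreeSets elements orders :=
      (pvMem_sumFreeSets elements orders _).mpr ⟨pvBits_sublist n s, hbs, hss⟩
    obtain ⟨M, hM, hMs⟩ := pvExtend elements orders _ hsfs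
    obtain ⟨hMsub, hMsf⟩ := pvMaximal_facts elements orders M hM
    set t' := (pvBits n t).filter (fun x => decide (¬ x ∈ M)) with ht'def
    have hdisj : ∀ x, ¬(x ∈ pvBits n s ∧ x ∈ pvBits n t) := by
      intro x ⟨hx1, hx2⟩
      rw [pvAnd_eq_zero_iff] at hd
      exact hd x ⟨((pvMem_bits n s x).mp hx1).2, ((pvMem_bits n t x).mp hx2).2⟩
    have hcount : (pvBits n s).length + (pvBits n t).length ≤ M.length + t'.length :=
      pvCount_le _ _ M ((pvBits_sublist n s).nodup List.nodup_range)
        ((pvBits_sublist n t).nodup List.nodup_range) hMs hdisj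
    have hM0 : M.length ≤ pvBest0 elements orders :=
      (PySem.List.le_foldl_max ((pvMaximal elements orders).map List.length) 0).2 _
        (List.mem_map_of_mem hM)
    have hA0 : pvBest0 elements orders ≤
        (pvMaximal elements orders).foldl (pvAStep elements orders) (pvBest0 elements orders) :=
      pvFoldl_mono _ (pvAStep_ge elements orders) _ _
    rcases eq_or_ne t' [] with ht0 | htne
    · rw [ht0] at hcount
      simp only [List.length_nil, Nat.add_zero] at hcount
      omega
    · have ht'rem : t'.Sublist ((List.range n).filter (fun i => decide (¬ i ∈ M))) :=
        List.Sublist.filter _ (pvBits_sublist n t)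
      have hreach : ∀ best, M.length + t'.length ≤ pvAStep elements orders best M := by
        intro best
        unfold pvAStep
        refine pvInner_reach _ orders M.length t'.length
          (List.length_pos_iff.mpr htne) ?_ _ best ?_
        · refine (pvFound_iff _ orders t'.length).mpr
            ⟨t'.map (fun i => elements.getD i []), List.Sublist.map _ ht'rem, by simp, ?_⟩
          exact (pvCheck_iff elements orders t').mpr
            (pvSF_mono elements orders (fun x hx => List.mem_of_mem_filter hx) hst)
        · simpa using ht'rem.length_le
      have := pvFoldl_reach (pvAStep elements orders) (pvAStep_ge elements orders) hM
        (M.length + t'.length) hreach (pvBest0 elements orders)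
      omega

theorem pvA_eq_OPT (elements : List (List Int)) (orders : List Int) :
    schur_2_colors_py elements orders = (pvOPT elements orders : Int) := by
  rw [pvA_unfold]
  exact congrArg _ (Nat.le_antisymm (pvA_le_OPT elements orders) (pvOPT_le_A elements orders))

-- ---- B = pvOPT ----

theorem pvBit01 (m i : Nat) : (m >>> i) &&& 1 = if m.testBit i then 1 else 0 := by
  have h3 : ((m >>> i) &&& 1 == 1) = m.testBit i := pvBit_eq m i
  have h5 : (m >>> i) &&& 1 = (m >>> i) % 2 := Nat.and_one_is_mod _
  have h6 := Nat.mod_two_eq_zero_or_one (m >>> i)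
  rcases hb : m.testBit i
  · rw [hb] at h3
    have h7 : (m >>> i) &&& 1 ≠ 1 := by
      intro h; rw [h] at h3; simp at h3
    simp only [Bool.false_eq_true, if_false]
    omega
  · rw [hb] at h3
    have h7 : (m >>> i) &&& 1 = 1 := by
      rcases hx : (m >>> i) &&& 1 == 1
      · rw [hx] at h3; simp at h3
      · simp only [beq_iff_eq] at hx; exact hx
    simp only [if_true]
    exact h7

theorem pvTestBit_lt {m n j : Nat} (hm : m < 2^n) (hj : m.testBit j = true) : j < n := by
  by_contra h
  have : m < 2^j := lt_of_lt_of_le hm (Nat.pow_le_pow_right (by norm_num) (by omega))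
  rw [Nat.testBit_eq_false_of_lt this] at hj
  simp at hj

theorem pvSubmask_trans {t s m : Nat} (h1 : t &&& s = t) (h2 : s &&& m = s) : t &&& m = t := by
  apply Nat.eq_of_testBit_eq
  intro j
  simp only [Nat.testBit_and]
  rcases hj : t.testBit j
  · simp
  · rw [pvSubmask_testBit h2 (pvSubmask_testBit h1 hj)]; simp

theorem pvPc_mono (n : Nat) {t m : Nat} (h : t &&& m = t) :
    (pvBits n t).length ≤ (pvBits n m).length := by
  unfold pvBits
  rw [← List.countP_eq_length_filter, ← List.countP_eq_length_filter]
  exact List.countP_mono_left (fun x _ hx => pvSubmask_testBit h hx)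

theorem pvXor_lt {m i : Nat} (h : m.testBit i = true) : m ^^^ 2^i < m := by
  refine Nat.lt_of_testBit i ?_ h ?_
  · simp [Nat.testBit_xor, h, Nat.testBit_two_pow]
  · intro j hj
    simp [Nat.testBit_xor, Nat.testBit_two_pow, (show i ≠ j from by omega)]

theorem pvXor_submask {m i : Nat} (h : m.testBit i = true) : (m ^^^ 2^i) &&& m = m ^^^ 2^i := by
  apply Nat.eq_of_testBit_eq
  intro j
  simp only [Nat.testBit_and, Nat.testBit_xor, Nat.testBit_two_pow]
  rcases eq_or_ne i j with rfl | hne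
  · simp [h]
  · simp [hne]

theorem pvSubmask_xor {t m i : Nat} (h : t &&& m = t) (ht : t.testBit i = false) :
    t &&& (m ^^^ 2^i) = t := by
  apply Nat.eq_of_testBit_eq
  intro j
  simp only [Nat.testBit_and, Nat.testBit_xor, Nat.testBit_two_pow]
  rcases hj : t.testBit j
  · simp
  · have hmj := pvSubmask_testBit h hj
    have hij : i ≠ j := fun he => by rw [he, hj] at ht; simp at ht
    simp [hmj, hij]

theorem pvSubmask_exists_bit {t m : Nat} (h : t &&& m = t) (hne : t ≠ m) :
    ∃ i, m.testBit i = true ∧ t.testBit i = false := by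
  by_contra hc
  push Not at hc
  apply hne
  apply Nat.eq_of_testBit_eq
  intro j
  rcases hmj : m.testBit j
  · rcases htj : t.testBit j
    · rfl
    · exact absurd (pvSubmask_testBit h htj) (by simp [hmj])
  · rcases htj : t.testBit j
    · exact absurd htj (hc j hmj)
    · rfl

theorem pvTestBit_comp {n mask j : Nat} (hm : mask < 2^n) :
    ((2^n - 1) ^^^ mask).testBit j = (decide (j < n) && !mask.testBit j) := by
  rcases Nat.lt_or_ge j n with hj | hj
  · rcases hb : mask.testBit j <;>
      simp [Nat.testBit_xor, Nat.testBit_two_pow_sub_one, hj, hb]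
  · have h1 : mask.testBit j = false :=
      Nat.testBit_eq_false_of_lt (lt_of_lt_of_le hm (Nat.pow_le_pow_right (by norm_num) hj))
    simp [Nat.testBit_xor, Nat.testBit_two_pow_sub_one, h1, (show ¬ j < n from by omega)]

theorem pvComp_lt (n mask : Nat) (hm : mask < 2^n) : (2^n - 1) ^^^ mask < 2^n :=
  Nat.xor_lt_two_pow (by have : 1 ≤ 2^n := Nat.one_le_two_pow; omega) hm

theorem pvSub_comp_of {n t mask : Nat} (ht : t < 2^n) (hd : t &&& mask = 0) (hm : mask < 2^n) :
    t &&& ((2^n - 1) ^^^ mask) = t := by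
  apply Nat.eq_of_testBit_eq
  intro j
  simp only [Nat.testBit_and, pvTestBit_comp hm]
  rcases hj : t.testBit j
  · simp
  · have hjn : j < n := pvTestBit_lt ht hj
    have hmj : mask.testBit j = false := by
      rcases hmj : mask.testBit j
      · rfl
      · exact absurd ((pvAnd_eq_zero_iff t mask).mp hd j) (by simp [hj, hmj])
    simp [hjn, hmj]

theorem pvDisj_of_sub_comp {n t mask : Nat} (hm : mask < 2^n)
    (h : t &&& ((2^n - 1) ^^^ mask) = t) : t &&& mask = 0 := by
  rw [pvAnd_eq_zero_iff]
  intro j ⟨hj1, hj2⟩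
  have := pvSubmask_testBit h hj1
  rw [pvTestBit_comp hm, hj2] at this
  simp at this

-- ---- what the B tables hold ----

theorem pvSf_getD (elements : List (List Int)) (orders : List Int) {m : Nat}
    (hm : m < 2^elements.length) : (pvSfList elements orders).getD m false = pvOk elements orders m := by
  unfold pvSfList
  rw [PySem.List.foldl_append_singleton_eq_map, List.nil_append,
    PySem.List.getD_map_range _ _ _ _ hm]

theorem pvOk_iff (elements : List (List Int)) (orders : List Int) (m : Nat) :
    pvOk elements orders m = true ↔ pvSF elements orders (pvBits elements.length m) := by
  unfold pvOk
  rw [show (List.range elements.length).filter (fun i => (m >>> i) &&& 1 == 1)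
      = pvBits elements.length m from List.filter_congr (fun i _ => pvBit_eq m i)]
  simp only [pvAltAdd_eq]
  exact pvCheck_iff elements orders (pvBits elements.length m)

theorem pvPc_getD (elements : List (List Int)) {m : Nat} (hm : m < 2^elements.length) :
    (pvPcList elements).getD m 0 = (pvBits elements.length m).length := by
  unfold pvPcList
  rw [PySem.List.foldl_append_singleton_eq_map, List.nil_append,
    PySem.List.getD_map_range _ _ _ _ hm]
  rw [show (List.range elements.length).map (fun i => (m >>> i) &&& 1)
      = (List.range elements.length).map (fun i => if m.testBit i then 1 else 0) from
    List.map_congr_left (fun i _ => pvBit01 m i)]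
  rw [PySem.List.sum_map_ite_one_zero_nat]
  unfold pvBits
  rw [← List.countP_eq_length_filter]

/-- the DP value: size of the largest sum-free subset of `m` -/
def pvMaxSF (elements : List (List Int)) (orders : List Int) (m : Nat) : Nat :=
  (Finset.range (2^elements.length)).sup fun t =>
    if t &&& m = t ∧ pvSF elements orders (pvBits elements.length t)
    then (pvBits elements.length t).length else 0

theorem pvLe_maxSF (elements : List (List Int)) (orders : List Int) {t m : Nat}
    (ht : t < 2^elements.length) (hsub : t &&& m = t)
    (hsf : pvSF elements orders (pvBits elements.length t)) :
    (pvBits elements.length t).length ≤ pvMaxSF elements orders m := by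
  have := Finset.le_sup (f := fun t =>
    if t &&& m = t ∧ pvSF elements orders (pvBits elements.length t)
    then (pvBits elements.length t).length else 0) (Finset.mem_range.mpr ht)
  dsimp only at this
  rwa [if_pos ⟨hsub, hsf⟩] at this

theorem pvMaxSF_le (elements : List (List Int)) (orders : List Int) (m C : Nat)
    (h : ∀ t, t < 2^elements.length → t &&& m = t →
      pvSF elements orders (pvBits elements.length t) →
      (pvBits elements.length t).length ≤ C) : pvMaxSF elements orders m ≤ C := by
  apply Finset.sup_le
  intro t htm
  split
  · rename_i hc
    exact h t (Finset.mem_range.mp htm) hc.1 hc.2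
  · exact Nat.zero_le _

theorem pvMaxSF_mono (elements : List (List Int)) (orders : List Int) {s m : Nat}
    (h : s &&& m = s) : pvMaxSF elements orders s ≤ pvMaxSF elements orders m :=
  pvMaxSF_le elements orders s _ (fun t htl hts hsf =>
    pvLe_maxSF elements orders htl (pvSubmask_trans hts h) hsf)

theorem pvMaxSF_zero (elements : List (List Int)) (orders : List Int) :
    pvMaxSF elements orders 0 = 0 := by
  apply Nat.le_antisymm
  · refine pvMaxSF_le elements orders 0 0 (fun t htl hts hsf => ?_)
    have : t = 0 := by rw [← hts, Nat.and_zero]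
    subst this
    simp [pvBits_zero]
  · exact Nat.zero_le _

theorem pvMaxSF_of_SF (elements : List (List Int)) (orders : List Int) {m : Nat}
    (hm : m < 2^elements.length) (hsf : pvSF elements orders (pvBits elements.length m)) :
    pvMaxSF elements orders m = (pvBits elements.length m).length := by
  apply Nat.le_antisymm
  · exact pvMaxSF_le elements orders m _ (fun t htl hts _ => pvPc_mono _ hts)
  · exact pvLe_maxSF elements orders hm (Nat.and_self m) hsf

-- ---- the f table ----

def pvFStep (elements : List (List Int)) (orders : List Int) (f : List Nat) (mask : Nat) : List Nat :=
  f ++ [if (pvSfList elements orders).getD mask false then (pvPcList elements).getD mask 0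
        else (List.range elements.length).foldl (fun best i =>
          if ((mask >>> i) &&& 1 == 1) && decide (f.getD (mask ^^^ (1 <<< i)) 0 > best)
          then f.getD (mask ^^^ (1 <<< i)) 0 else best) 0]

def pvFAux (elements : List (List Int)) (orders : List Int) (k : Nat) : List Nat :=
  (List.range' 1 k).foldl (pvFStep elements orders) [0]

theorem pvFList_eq (elements : List (List Int)) (orders : List Int) :
    pvFList elements orders = pvFAux elements orders (2^elements.length - 1) := rfl

theorem pvFAux_succ (elements : List (List Int)) (orders : List Int) (k : Nat) :
    pvFAux elements orders (k+1) = pvFStep elements orders (pvFAux elements orders k) (k+1) := by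
  unfold pvFAux
  rw [show List.range' 1 (k+1) = List.range' 1 k ++ [k+1] from by rw [List.range'_concat]; norm_num [Nat.add_comm],
    List.foldl_append]
  rfl

theorem pvFAux_length (elements : List (List Int)) (orders : List Int) (k : Nat) :
    (pvFAux elements orders k).length = k + 1 := by
  induction k with
  | zero => rfl
  | succ k ih => rw [pvFAux_succ]; unfold pvFStep; simp [ih]

theorem pvFAux_spec (elements : List (List Int)) (orders : List Int) :
    ∀ k, k < 2^elements.length → ∀ j ≤ k,
      (pvFAux elements orders k).getD j 0 = pvMaxSF elements orders j := by
  intro k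
  induction k with
  | zero =>
    intro _ j hj
    interval_cases j
    simp [pvFAux, pvMaxSF_zero]
  | succ k ih =>
    intro hk j hj
    rw [pvFAux_succ]
    unfold pvFStep
    rcases Nat.lt_or_ge j (k+1) with hjk | hjk
    · rw [List.getD_append _ _ _ _ (by rw [pvFAux_length]; omega)]
      exact ih (by omega) j (by omega)
    · have hj1 : j = k + 1 := by omega
      subst hj1
      rw [show (k+1) = (pvFAux elements orders k).length from (pvFAux_length elements orders k).symm]
      rw [show ∀ (l : List Nat) (v : Nat), (l ++ [v]).getD l.length 0 = v from fun l v => by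
        simp [List.getD_eq_getElem?_getD]]
      rw [pvFAux_length]
      -- the step value equals pvMaxSF (k+1)
      have hklt : k + 1 < 2^elements.length := hk
      rw [pvSf_getD elements orders hklt]
      rcases hok : pvOk elements orders (k+1)
      · -- not sum-free: max over set bits of f[(k+1) ^^^ 2^i]
        simp only [Bool.false_eq_true, if_false]
        have hnsf : ¬ pvSF elements orders (pvBits elements.length (k+1)) :=
          fun h => by rw [(pvOk_iff elements orders (k+1)).mpr h] at hok; simp at hok
        apply Nat.le_antisymm
        · -- fold ≤ maxSF (k+1)
          refine pvFoldl_le _ _ _ (fun best i hi hle => ?_) 0 (Nat.zero_le _)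
          split
          · rename_i hcond
            simp only [Bool.and_eq_true, pvBit_eq, decide_eq_true_eq] at hcond
            obtain ⟨hbit, _⟩ := hcond
            rw [Nat.one_shiftLeft] at *
            have hlt : (k+1) ^^^ 2^i < k+1 := pvXor_lt hbit
            rw [ih (by omega) _ (by omega)]
            exact pvMaxSF_mono elements orders (pvXor_submask hbit)
          · exact hle
        · -- maxSF (k+1) ≤ fold
          refine pvMaxSF_le elements orders _ _ (fun t htl hts hsf => ?_)
          have hne : t ≠ k+1 := fun he => hnsf (he ▸ hsf)
          obtain ⟨i, hbit, htb⟩ := pvSubmask_exists_bit hts hne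
          have hin : i < elements.length := pvTestBit_lt hklt hbit
          have hxlt : (k+1) ^^^ 2^i < k+1 := pvXor_lt hbit
          have hstep : (pvBits elements.length t).length ≤
              (pvFAux elements orders k).getD ((k+1) ^^^ (1 <<< i)) 0 := by
            rw [Nat.one_shiftLeft, ih (by omega) _ (by omega)]
            exact pvLe_maxSF elements orders htl (pvSubmask_xor hts htb) hsf
          refine pvFoldl_reach _ (fun b x => ?_) (List.mem_range.mpr hin) _ (fun best => ?_) 0
          · dsimp only
            split
            · rename_i hc
              simp only [Bool.and_eq_true, decide_eq_true_eq] at hc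
              omega
            · exact le_refl _
          · dsimp only
            rw [show ((k+1) >>> i &&& 1 == 1) = true from by rw [pvBit_eq]; exact hbit]
            simp only [Bool.true_and]
            split
            · exact hstep
            · rename_i hc
              simp only [decide_eq_true_eq] at hc
              omega
      · -- sum-free: pc (k+1)
        simp only [if_true]
        have hsf : pvSF elements orders (pvBits elements.length (k+1)) :=
          (pvOk_iff elements orders (k+1)).mp hok
        rw [pvPc_getD elements hklt, pvMaxSF_of_SF elements orders hklt hsf]

theorem pvF_getD (elements : List (List Int)) (orders : List Int) {m : Nat}
    (hm : m < 2^elements.length) :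
    (pvFList elements orders).getD m 0 = pvMaxSF elements orders m := by
  rw [pvFList_eq]
  have hpos : 1 ≤ 2^elements.length := Nat.one_le_two_pow
  exact pvFAux_spec elements orders (2^elements.length - 1) (by omega) m (by omega)

-- ---- the final loop of B ----

def pvBStep (elements : List (List Int)) (orders : List Int) (best mask : Nat) : Nat :=
  if (pvSfList elements orders).getD mask false &&
     decide ((pvPcList elements).getD mask 0 +
       (pvFList elements orders).getD ((2^elements.length - 1) ^^^ mask) 0 > best)
  then (pvPcList elements).getD mask 0 +
       (pvFList elements orders).getD ((2^elements.length - 1) ^^^ mask) 0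
  else best

theorem pvB_unfold (elements : List (List Int)) (orders : List Int) :
    schur_2_colors_py_alt elements orders =
      (((List.range (2^elements.length)).foldl (pvBStep elements orders) 0 : Nat) : Int) := rfl

theorem pvBStep_ge (elements : List (List Int)) (orders : List Int) (best mask : Nat) :
    best ≤ pvBStep elements orders best mask := by
  unfold pvBStep
  split
  · rename_i hc
    simp only [Bool.and_eq_true, decide_eq_true_eq] at hc
    omega
  · exact le_refl _

theorem pvB_le_OPT (elements : List (List Int)) (orders : List Int) :
    (List.range (2^elements.length)).foldl (pvBStep elements orders) 0 ≤ pvOPT elements orders := by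
  refine pvFoldl_le _ _ _ (fun best mask hmem hle => ?_) 0 (Nat.zero_le _)
  have hm : mask < 2^elements.length := List.mem_range.mp hmem
  unfold pvBStep
  split
  · rename_i hc
    simp only [Bool.and_eq_true, decide_eq_true_eq] at hc
    have hsf : pvSF elements orders (pvBits elements.length mask) :=
      (pvOk_iff elements orders mask).mp (by rw [← pvSf_getD elements orders hm]; exact hc.1)
    have hcomp : (2^elements.length - 1) ^^^ mask < 2^elements.length :=
      pvComp_lt elements.length mask hm
    rw [pvPc_getD elements hm, pvF_getD elements orders hcomp]
    -- the sup pvMaxSF is attained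
    obtain ⟨t, htm, hteq⟩ := Finset.exists_mem_eq_sup (Finset.range (2^elements.length))
      ⟨0, Finset.mem_range.mpr (Nat.one_le_two_pow)⟩ (fun t =>
        if t &&& ((2^elements.length - 1) ^^^ mask) = t ∧
            pvSF elements orders (pvBits elements.length t)
        then (pvBits elements.length t).length else 0)
    rw [show pvMaxSF elements orders ((2^elements.length - 1) ^^^ mask) = _ from hteq]
    split
    · rename_i hct
      have hdisj : mask &&& t = 0 := by
        rw [Nat.and_comm]
        exact pvDisj_of_sub_comp hm hct.1
      exact pvLe_OPT elements orders hm (Finset.mem_range.mp htm) hdisj hsf hct.2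
    · have := pvLe_OPT elements orders hm (Nat.one_le_two_pow) (Nat.and_zero mask) hsf
        (by rw [pvBits_zero]; intro a ha; cases ha)
      simpa [pvBits_zero] using this
  · exact hle

theorem pvOPT_le_B (elements : List (List Int)) (orders : List Int) :
    pvOPT elements orders ≤ (List.range (2^elements.length)).foldl (pvBStep elements orders) 0 := by
  refine pvOPT_le elements orders _ (fun s t hs ht hd hss hst => ?_)
  refine pvFoldl_reach _ (pvBStep_ge elements orders) (List.mem_range.mpr hs) _ (fun best => ?_) 0
  have hcomp : (2^elements.length - 1) ^^^ s < 2^elements.length :=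
    pvComp_lt elements.length s hs
  have hsub : t &&& ((2^elements.length - 1) ^^^ s) = t :=
    pvSub_comp_of ht (by rw [Nat.and_comm]; exact hd) hs
  have hft : (pvBits elements.length t).length ≤
      (pvFList elements orders).getD ((2^elements.length - 1) ^^^ s) 0 := by
    rw [pvF_getD elements orders hcomp]
    exact pvLe_maxSF elements orders ht hsub hst
  unfold pvBStep
  rw [pvSf_getD elements orders hs, (pvOk_iff elements orders s).mpr hss,
    pvPc_getD elements hs]
  simp only [Bool.true_and]
  split
  · rename_i hc
    omega
  · rename_i hc
    simp only [decide_eq_true_eq] at hc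
    omega

theorem pvB_eq_OPT (elements : List (List Int)) (orders : List Int) :
    schur_2_colors_py_alt elements orders = (pvOPT elements orders : Int) := by
  rw [pvB_unfold]
  exact congrArg _ (Nat.le_antisymm (pvB_le_OPT elements orders) (pvOPT_le_B elements orders))

-- ===== VERDICT (by name: the statement is the Claim_ definition above) =====
theorem schur_2_colors_py_spec : Claim_equal_schur_2_colors_py := by
  intro elements orders _ _
  unfold Spec_schur_2_colors_py
  rw [pvA_eq_OPT, pvB_eq_OPT]
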